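-- pv_equiv track=rewrite | github.com/vanbako/xzre-ghidra | scripts/manage_types_metadata.py | remove_attributes
-- ===== SOURCE A (Python) =====
-- from typing import Dict, List, Optional, Tuple
--
-- ATTR_TOKEN = "__attribute__"
--
-- def remove_attributes(text: str) -> str:
--     """Strip GCC-style __attribute__((...)) blocks to simplify parsing."""
--
--     result: List[str] = []
--     i = 0
--     length = len(text)
--     while i < length:
--         if text.startswith(ATTR_TOKEN, i):
--             i += len(ATTR_TOKEN)
--             while i < length and text[i].isspace():
--                 i += 1
--             if i < length and text[i] == "(":
--                 depth = 0
--                 while i < length: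
--                     char = text[i]
--                     if char == "(":
--                         depth += 1
--                     elif char == ")":
--                         depth -= 1
--                         if depth == 0:
--                             i += 1
--                             break
--                     i += 1
--             continue
--         result.append(text[i])
--         i += 1
--     return "".join(result)
-- ===== SOURCE B (Python) =====
-- ATTR_TOKEN = "__attribute__"
--
-- def remove_attributes(text: str) -> str:
--     """Strip GCC-style __attribute__((...)) blocks to simplify parsing."""
--     parts = []
--     pos = 0
--     n = len(text)
--     while True:
--         idx = text.find(ATTR_TOKEN, pos)
--         if idx == -1:
--             parts.append(text[pos:])
--             break
--         parts.append(text[pos:idx])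
--         j = idx + len(ATTR_TOKEN)
--         while j < n and text[j].isspace():
--             j += 1
--         if j < n and text[j] == "(":
--             depth = 0
--             while j < n:
--                 c = text[j]
--                 if c == "(":
--                     depth += 1
--                 elif c == ")":
--                     depth -= 1
--                     if depth == 0:
--                         j += 1
--                         break
--                 j += 1
--         pos = j
--     return "".join(parts)
-- ===== Notes on version B (the rewrite author's own statement) =====
-- stated objective: alternative
-- what changed: Replaced A's char-by-char scan that appends one character per iteration with a find-and-slice loop: each iteration finds the next __attribute__ token, copies the whole preceding segment at once, and skips whitespace plus the balanced-paren block.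
import Mathlib
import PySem

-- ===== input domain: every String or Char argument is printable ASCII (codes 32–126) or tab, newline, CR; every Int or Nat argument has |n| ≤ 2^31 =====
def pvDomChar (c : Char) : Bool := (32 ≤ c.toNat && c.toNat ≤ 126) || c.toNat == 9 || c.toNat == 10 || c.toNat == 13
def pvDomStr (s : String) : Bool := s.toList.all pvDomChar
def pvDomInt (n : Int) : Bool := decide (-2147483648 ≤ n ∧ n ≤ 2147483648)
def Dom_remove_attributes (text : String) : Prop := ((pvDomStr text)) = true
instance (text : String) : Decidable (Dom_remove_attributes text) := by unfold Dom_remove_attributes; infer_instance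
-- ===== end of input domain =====

-- B replaces A's char-by-char scan with a find-and-slice loop (one segment appended per
-- token occurrence instead of one character per iteration); objective: alternative decomposition.

def pvAttrTok : List Char := "__attribute__".toList

-- ===== PORT A =====
-- A's balanced-parenthesis while loop: returns the suffix after the block (or [] at end of text).
def pvParenA (depth : Int) : List Char → List Char
  | [] => []
  | c :: rest =>
    if c = '(' then pvParenA (depth + 1) rest
    else if c = ')' then
      if depth - 1 = 0 then rest else pvParenA (depth - 1) rest
    else pvParenA depth rest

-- A's post-token skipping: the whitespace while loop, then (if next char is '(') the paren loop.
def pvAfterA (l : List Char) : List Char :=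
  match l.dropWhile (fun c => PySem.Chars.isspace c) with
  | '(' :: rest => pvParenA 0 ('(' :: rest)
  | l' => l'

theorem pvParenA_len (l : List Char) : ∀ d, (pvParenA d l).length ≤ l.length := by
  induction l with
  | nil => intro d; simp [pvParenA]
  | cons c rest ih =>
    intro d
    simp only [pvParenA]
    split_ifs <;> simp <;> exact Nat.le_succ_of_le (ih _)

theorem pvAfterA_len (l : List Char) : (pvAfterA l).length ≤ l.length := by
  have h1 : (l.dropWhile (fun c => PySem.Chars.isspace c)).length ≤ l.length :=
    List.length_dropWhile_le _ _
  unfold pvAfterA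
  split
  · next heq => exact le_trans (by rw [← heq]; exact pvParenA_len _ _) h1
  · exact h1

-- A's main while loop, phrased on the remaining suffix of the text.
def pvLoopA (l : List Char) : List Char :=
  match l with
  | [] => []
  | c :: rest =>
    if pvAttrTok.isPrefixOf (c :: rest) then
      pvLoopA (pvAfterA ((c :: rest).drop pvAttrTok.length))
    else c :: pvLoopA rest
termination_by l.length
decreasing_by
  · have h1 := pvAfterA_len ((c :: rest).drop pvAttrTok.length)
    have h2 : ((c :: rest).drop pvAttrTok.length).length = (c :: rest).length - pvAttrTok.length :=
      List.length_drop
    have h3 : pvAttrTok.length = 13 := by decide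
    simp only [List.length_cons] at *
    omega
  · simp

def remove_attributes (text : String) : String := String.ofList (pvLoopA text.toList)

-- ===== PORT B =====
-- B's balanced-parenthesis consumer (Source B's inner depth loop).
def pvParenB (depth : Int) : List Char → List Char
  | [] => []
  | c :: rest =>
    if c = '(' then pvParenB (depth + 1) rest
    else if c = ')' then
      if depth - 1 = 0 then rest else pvParenB (depth - 1) rest
    else pvParenB depth rest

-- B's cursor advance after a found token: whitespace, then an optional balanced block.
def pvAfterB (l : List Char) : List Char :=
  match l.dropWhile (fun c => PySem.Chars.isspace c) with
  | '(' :: rest => pvParenB 0 ('(' :: rest)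
  | l' => l'

-- Source B's `idx = text.find(ATTR_TOKEN, pos)` together with the slices `text[pos:idx]` and the
-- advance past the token, phrased on the suffix: none means idx == -1; some (b, r) means the
-- segment text[pos:idx] is b and r is the suffix just after the token.
def pvFindTok : List Char → Option (List Char × List Char)
  | [] => none
  | c :: rest =>
    if pvAttrTok.isPrefixOf (c :: rest) then some ([], (c :: rest).drop pvAttrTok.length)
    else
      match pvFindTok rest with
      | none => none
      | some (b, r) => some (c :: b, r)

theorem pvFindTok_len : ∀ (l b r : List Char), pvFindTok l = some (b, r) → r.length < l.length := by
  intro l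
  induction l with
  | nil => intro b r h; simp [pvFindTok] at h
  | cons c rest ih =>
    intro b r h
    simp only [pvFindTok] at h
    split_ifs at h with hp
    · simp only [Option.some.injEq, Prod.mk.injEq] at h
      obtain ⟨hb, hr⟩ := h
      have h3 : pvAttrTok.length = 13 := by decide
      rw [← hr]
      simp only [List.length_drop, List.length_cons, h3]
      omega
    · revert h
      match hf : pvFindTok rest with
      | none => intro h; simp at h
      | some (b', r') =>
        intro h
        simp only [Option.some.injEq, Prod.mk.injEq] at h
        obtain ⟨hb, hr⟩ := h
        have := ih b' r' hf
        rw [← hr]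
        simp only [List.length_cons]
        omega

theorem pvParenB_len_eq (l : List Char) : ∀ d, pvParenB d l = pvParenA d l := by
  induction l with
  | nil => intro d; rfl
  | cons c rest ih =>
    intro d
    simp only [pvParenA, pvParenB]
    split_ifs <;> first | rfl | exact ih _

theorem pvAfterB_eq (l : List Char) : pvAfterB l = pvAfterA l := by
  unfold pvAfterA pvAfterB
  split <;> simp_all [pvParenB_len_eq]

-- B's outer while loop: emit the segment before each occurrence, skip the attribute, repeat.
def pvLoopB (l : List Char) : List Char :=
  match _h : pvFindTok l with
  | none => l
  | some (b, r) => b ++ pvLoopB (pvAfterB r)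
termination_by l.length
decreasing_by
  calc (pvAfterB r).length ≤ r.length := by rw [pvAfterB_eq]; exact pvAfterA_len r
    _ < l.length := pvFindTok_len l b r _h

def remove_attributes_alt (text : String) : String := String.ofList (pvLoopB text.toList)

-- ===== PRECONDITION & SPEC =====
def Spec_remove_attributes (text : String) (out : String) : Prop := out = remove_attributes_alt text
instance (text : String) (out : String) : Decidable (Spec_remove_attributes text out) := by unfold Spec_remove_attributes; infer_instance

-- ===== CLAIM (what is proved, stated in full; the proofs are below) =====
def Claim_equal_remove_attributes : Prop := ∀ (text : String), Dom_remove_attributes text → Spec_remove_attributes text (remove_attributes text)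

-- ===== LEMMAS AND PROOFS =====

theorem pvLoopA_nil : pvLoopA [] = [] := by rw [pvLoopA]

theorem pvLoopA_cons_pos {c : Char} {rest : List Char}
    (h : pvAttrTok.isPrefixOf (c :: rest)) :
    pvLoopA (c :: rest) = pvLoopA (pvAfterA ((c :: rest).drop pvAttrTok.length)) := by
  rw [pvLoopA]; simp [h]

theorem pvLoopA_cons_neg {c : Char} {rest : List Char}
    (h : ¬ pvAttrTok.isPrefixOf (c :: rest)) :
    pvLoopA (c :: rest) = c :: pvLoopA rest := by
  rw [pvLoopA]; simp [h]

theorem pvFindTok_none (l : List Char) (h : pvFindTok l = none) : pvLoopA l = l := by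
  induction l with
  | nil => exact pvLoopA_nil
  | cons c rest ih =>
    simp only [pvFindTok] at h
    split_ifs at h with hp
    · revert h
      match hf : pvFindTok rest with
      | none => intro _; rw [pvLoopA_cons_neg hp, ih hf]
      | some (b, r) => intro h; simp at h

theorem pvFindTok_some (l : List Char) :
    ∀ b r, pvFindTok l = some (b, r) → pvLoopA l = b ++ pvLoopA (pvAfterA r) := by
  induction l with
  | nil => intro b r h; simp [pvFindTok] at h
  | cons c rest ih =>
    intro b r h
    simp only [pvFindTok] at h
    split_ifs at h with hp
    · simp only [Option.some.injEq, Prod.mk.injEq] at h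
      obtain ⟨hb, hr⟩ := h
      rw [pvLoopA_cons_pos hp, ← hb, ← hr]
      rfl
    · revert h
      match hf : pvFindTok rest with
      | none => intro h; simp at h
      | some (b', r') =>
        intro h
        simp only [Option.some.injEq, Prod.mk.injEq] at h
        obtain ⟨hb, hr⟩ := h
        rw [pvLoopA_cons_neg hp, ih b' r' hf, ← hb, hr]
        rfl

theorem pvLoopB_eq (l : List Char) : pvLoopB l = pvLoopA l := by
  induction l using pvLoopB.induct with
  | case1 l h =>
    rw [pvLoopB]
    split
    · exact (pvFindTok_none l h).symm
    · next heq => rw [h] at heq; simp at heq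
  | case2 l b r h ih =>
    rw [pvLoopB]
    split
    · next heq => rw [h] at heq; simp at heq
    · next b' r' heq =>
      rw [h] at heq
      simp only [Option.some.injEq, Prod.mk.injEq] at heq
      obtain ⟨hb, hr⟩ := heq
      subst hb; subst hr
      rw [pvAfterB_eq] at ih ⊢
      rw [ih, ← pvFindTok_some l b r h]

-- ===== VERDICT (by name: the statement is the Claim_ definition above) =====
theorem remove_attributes_spec : Claim_equal_remove_attributes := by
  intro text _
  unfold Spec_remove_attributes remove_attributes remove_attributes_alt
  rw [pvLoopB_eq]
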